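-- pv_equiv track=rewrite | github.com/Dixith-ai/Learning-Python | advanced/advanced/minimum_window_substring.py | min_window_substring_with_circular
-- ===== SOURCE A (Python) =====
-- def min_window_substring_with_circular(s, t):
--     if not s or not t:
--         return ""
--
--     from collections import Counter
--
--     t_count = Counter(t)
--     required = len(t_count)
--
--     left = 0
--     formed = 0
--     window_counts = {}
--
--     ans = float('inf'), None, None
--
--     for right in range(2 * len(s)):
--         c = s[right % len(s)]
--         window_counts[c] = window_counts.get(c, 0) + 1
--
--         if c in t_count and window_counts[c] == t_count[c]:
--             formed += 1
--
--         while left <= right and formed == required: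
--             c = s[left % len(s)]
--
--             if right - left + 1 < ans[0]:
--                 ans = (right - left + 1, left, right)
--
--             window_counts[c] -= 1
--             if c in t_count and window_counts[c] < t_count[c]:
--                 formed -= 1
--
--             left += 1
--
--     return "" if ans[0] == float('inf') else s[ans[1]:ans[2] + 1]
-- ===== SOURCE B (Python) =====
-- def min_window_substring_with_circular(s, t):
--     if not s or not t:
--         return ""
--
--     from collections import Counter
--
--     n = len(s)
--     need = Counter(t)
--     required = len(need)
--
--     best = None  # (length, left, right)
--     for r in range(2 * n):
--         # fresh descending scan: find the largest left <= r whose window covers t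
--         cnt = {}
--         have = 0
--         found = None
--         for l in range(r, -1, -1):
--             c = s[l % n]
--             cnt[c] = cnt.get(c, 0) + 1
--             if c in need and cnt[c] == need[c]:
--                 have += 1
--             if have == required:
--                 found = l
--                 break
--         if found is not None and (best is None or r - found + 1 < best[0]):
--             best = (r - found + 1, found, r)
--
--     return "" if best is None else s[best[1]:best[2] + 1]
-- ===== Notes on version B (the rewrite author's own statement) =====
-- stated objective: alternative
-- what changed: Replaced the amortized two-pointer sliding window (persistent left pointer, incrementally maintained counts and 'formed' across right steps) with a per-right-end brute-force search: for each right in the doubled string, a fresh descending scan with its own counter finds the tightest covering window ending there, and the best is updated on strictly smaller length.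
import Mathlib
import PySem

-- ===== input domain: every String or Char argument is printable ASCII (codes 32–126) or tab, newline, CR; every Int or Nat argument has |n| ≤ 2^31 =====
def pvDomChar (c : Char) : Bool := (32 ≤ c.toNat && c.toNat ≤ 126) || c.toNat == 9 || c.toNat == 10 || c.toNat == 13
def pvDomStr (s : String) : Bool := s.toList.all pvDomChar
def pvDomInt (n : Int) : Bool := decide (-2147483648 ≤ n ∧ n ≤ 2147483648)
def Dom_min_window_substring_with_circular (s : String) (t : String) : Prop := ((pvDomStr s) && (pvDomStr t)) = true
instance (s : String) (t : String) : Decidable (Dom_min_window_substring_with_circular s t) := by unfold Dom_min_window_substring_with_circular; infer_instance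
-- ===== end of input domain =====

-- B replaces A's amortized two-pointer sliding window by a per-right-end fresh descending
-- scan (brute-force search for the tightest covering window ending at each right);
-- objective: alternative (same results, structurally different algorithm, not faster).


-- ===== PORT A =====
-- A's inner `while left <= right and formed == required` loop; state (left, formed, window_counts, ans).
def pvShrinkA (cs : List Char) (tc : PySem.Dict Char Int) (required : Int) (right : Nat)
    (left : Nat) (formed : Int) (wc : PySem.Dict Char Int)
    (ans : Option (Nat × Nat × Nat)) : Nat × Int × PySem.Dict Char Int × Option (Nat × Nat × Nat) :=
  if h : left ≤ right ∧ formed = required then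
    let c := cs.getD (left % cs.length) ' '
    let ans' : Option (Nat × Nat × Nat) :=
      match ans with
      | none => some (right - left + 1, left, right)
      | some (L, a, b) => if right - left + 1 < L then some (right - left + 1, left, right) else some (L, a, b)
    let wc' := wc.insert c (wc.getD c 0 - 1)
    let formed' := if tc.contains c = true ∧ wc'.getD c 0 < tc.getD c 0 then formed - 1 else formed
    pvShrinkA cs tc required right (left + 1) formed' wc' ans'
  else (left, formed, wc, ans)
  termination_by right + 1 - left
  decreasing_by omega

def min_window_substring_with_circular (s : String) (t : String) : String :=
  let cs := s.toList
  let ts := t.toList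
  if cs = [] ∨ ts = [] then ""
  else
    let tc := PySem.Dict.counter ts
    let required : Int := tc.size
    let fin := (List.range (2 * cs.length)).foldl
      (fun st right =>
        let c := cs.getD (right % cs.length) ' '
        let wc := st.2.2.1.insert c (st.2.2.1.getD c 0 + 1)
        let formed := if tc.contains c = true ∧ wc.getD c 0 = tc.getD c 0 then st.2.1 + 1 else st.2.1
        pvShrinkA cs tc required right st.1 formed wc st.2.2.2)
      ((0 : Nat), (0 : Int), PySem.Dict.empty, (none : Option (Nat × Nat × Nat)))
    match fin.2.2.2 with
    | none => ""
    | some (_, l, r) => String.ofList (PySem.List.slice cs (some (l : Int)) (some ((r : Int) + 1)))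

-- ===== PORT B =====
-- B's inner `for l in range(r, -1, -1)` scan: fresh counter, stop at the first (largest) covering left.
def pvScanB (cs : List Char) (tc : PySem.Dict Char Int) (required : Int)
    (l : Nat) (cnt : PySem.Dict Char Int) (hv : Int) : Option Nat :=
  let c := cs.getD (l % cs.length) ' '
  let cnt' := cnt.insert c (cnt.getD c 0 + 1)
  let hv' := if tc.contains c = true ∧ cnt'.getD c 0 = tc.getD c 0 then hv + 1 else hv
  if hv' = required then some l
  else match l with
    | 0 => none
    | l' + 1 => pvScanB cs tc required l' cnt' hv'

def min_window_substring_with_circular_alt (s : String) (t : String) : String :=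
  let cs := s.toList
  let ts := t.toList
  if cs = [] ∨ ts = [] then ""
  else
    let tc := PySem.Dict.counter ts
    let required : Int := tc.size
    let best := (List.range (2 * cs.length)).foldl
      (fun best r =>
        match pvScanB cs tc required r PySem.Dict.empty 0 with
        | none => best
        | some l =>
          match best with
          | none => some (r - l + 1, l, r)
          | some (L, a, b) => if r - l + 1 < L then some (r - l + 1, l, r) else some (L, a, b))
      (none : Option (Nat × Nat × Nat))
    match best with
    | none => ""
    | some (_, l, r) => String.ofList (PySem.List.slice cs (some (l : Int)) (some ((r : Int) + 1)))

-- ===== PRECONDITION & SPEC =====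
def Spec_min_window_substring_with_circular (s : String) (t : String) (out : String) : Prop := out = min_window_substring_with_circular_alt s t
instance (s : String) (t : String) (out : String) : Decidable (Spec_min_window_substring_with_circular s t out) := by unfold Spec_min_window_substring_with_circular; infer_instance

-- ===== CLAIM (what is proved, stated in full; the proofs are below) =====
def Claim_equal_min_window_substring_with_circular : Prop := ∀ (s : String) (t : String), Dom_min_window_substring_with_circular s t → Spec_min_window_substring_with_circular s t (min_window_substring_with_circular s t)

-- ===== LEMMAS AND PROOFS =====

-- Proof-layer definitions: windows of the doubled/circular string, coverage, the strict-min update.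
def pvG (cs : List Char) (i : Nat) : Char := cs.getD (i % cs.length) ' '

def pvWin (cs : List Char) (l r : Nat) : List Char := (List.range (r - l)).map (fun k => pvG cs (l + k))

abbrev pvSat (ts w : List Char) (c : Char) : Prop := ts.count c ≤ w.count c

def pvFormedN (ts w : List Char) : Nat := ((PySem.Set.ofList ts).filter (fun c => decide (pvSat ts w c))).length

abbrev pvCov (ts w : List Char) : Prop := ∀ c ∈ PySem.Set.ofList ts, pvSat ts w c

def pvUpd (ans : Option (Nat × Nat × Nat)) (cand : Nat × Nat × Nat) : Option (Nat × Nat × Nat) :=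
  match ans with
  | none => some cand
  | some (L, a, b) => if cand.1 < L then some cand else some (L, a, b)

def pvWOK (wc : PySem.Dict Char Int) (w : List Char) : Prop := ∀ c, wc.getD c 0 = (w.count c : Int)

lemma pvWin_nil (cs : List Char) (l : Nat) : pvWin cs l l = [] := by
  simp [pvWin]

lemma pvWin_succ (cs : List Char) (l r : Nat) (h : l ≤ r) :
    pvWin cs l (r + 1) = pvWin cs l r ++ [pvG cs r] := by
  have h1 : r + 1 - l = (r - l) + 1 := by omega
  have h2 : l + (r - l) = r := by omega
  simp [pvWin, h1, List.range_succ, h2]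

lemma pvWin_cons (cs : List Char) (l r : Nat) (h : l < r) :
    pvWin cs l r = pvG cs l :: pvWin cs (l + 1) r := by
  have h1 : r - l = (r - (l + 1)) + 1 := by omega
  rw [pvWin, h1, List.range_succ_eq_map, List.map_cons, List.map_map, pvWin]
  refine congrArg₂ _ (by simp) (List.map_congr_left ?_)
  intro a _
  simp [Function.comp]
  congr 1
  omega

lemma pvCov_nil (ts : List Char) (hts : ts ≠ []) : ¬ pvCov ts [] := by
  intro h
  obtain ⟨c, hc⟩ := List.exists_mem_of_ne_nil ts hts
  have hs := h c ((PySem.Set.mem_ofList ts c).mpr hc)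
  unfold pvSat at hs
  have hpos : 0 < ts.count c := List.count_pos_iff.mpr hc
  simp [List.count_nil] at hs
  omega

lemma pvCov_cons (ts w : List Char) (c : Char) (h : pvCov ts w) : pvCov ts (c :: w) := by
  intro x hx
  have hs := h x hx
  unfold pvSat at hs ⊢
  rw [List.count_cons]
  omega

lemma pvCov_anti (cs ts : List Char) (hts : ts ≠ []) (r : Nat) :
    ∀ (d l : Nat), pvCov ts (pvWin cs (l + d) r) → pvCov ts (pvWin cs l r) := by
  intro d
  induction d with
  | zero => intro l h; simpa using h
  | succ d ih =>
    intro l h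
    by_cases hlt : l + d < r
    · apply ih
      rw [pvWin_cons cs (l + d) r hlt]
      have he : l + (d + 1) = (l + d) + 1 := by omega
      rw [he] at h
      exact pvCov_cons _ _ _ h
    · exfalso
      have hz : r - (l + (d + 1)) = 0 := by omega
      have : pvWin cs (l + (d + 1)) r = [] := by simp [pvWin, hz]
      rw [this] at h
      exact pvCov_nil ts hts h

lemma pvCountFlip (K : List Char) (hK : K.Nodup) (p q : Char → Bool) (c : Char)
    (h1 : ∀ x ∈ K, x ≠ c → p x = q x) (h2 : p c = true → q c = true) :
    (K.filter q).length = (K.filter p).length + (if c ∈ K ∧ p c = false ∧ q c = true then 1 else 0) := by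
  induction K with
  | nil => simp
  | cons x K ih =>
    obtain ⟨hx, hK'⟩ := List.nodup_cons.mp hK
    by_cases hxc : x = c
    · subst hxc
      have hrest : K.filter p = K.filter q := by
        apply List.filter_congr
        intro y hy
        exact h1 y (List.mem_cons_of_mem _ hy) (fun e => hx (e ▸ hy))
      cases hp : p x <;> cases hq : q x
      · simp [List.filter_cons, hp, hq, hrest, hx]
      · simp [List.filter_cons, hp, hq, hrest, hx]
      · exact absurd (h2 hp) (by simp [hq])
      · simp [List.filter_cons, hp, hq, hrest, hx]
    · have h1x : p x = q x := h1 x List.mem_cons_self hxc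
      have hih := ih hK' (fun y hy hyc => h1 y (List.mem_cons_of_mem _ hy) hyc)
      have hmem : (c ∈ x :: K ∧ p c = false ∧ q c = true) ↔ (c ∈ K ∧ p c = false ∧ q c = true) := by
        constructor
        · rintro ⟨hm, h2, h3⟩
          rcases List.mem_cons.mp hm with e | hm'
          · exact absurd e.symm hxc
          · exact ⟨hm', h2, h3⟩
        · rintro ⟨hm, h2, h3⟩
          exact ⟨List.mem_cons_of_mem _ hm, h2, h3⟩
      rw [if_congr hmem rfl rfl]
      cases hp : p x
      · rw [List.filter_cons_of_neg (by simp [← h1x, hp]), List.filter_cons_of_neg (by simp [hp]), hih]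
      · rw [List.filter_cons_of_pos (by simp [← h1x, hp]), List.filter_cons_of_pos (by simp [hp])]
        simp only [List.length_cons, hih]
        omega

lemma pvFormed_add (ts w w' : List Char) (c : Char)
    (h : ∀ x, w'.count x = w.count x + (if c = x then 1 else 0)) :
    pvFormedN ts w' = pvFormedN ts w + (if c ∈ ts ∧ w.count c + 1 = ts.count c then 1 else 0) := by
  unfold pvFormedN
  rw [pvCountFlip (PySem.Set.ofList ts) (PySem.Set.nodup_ofList ts)
      (fun x => decide (pvSat ts w x)) (fun x => decide (pvSat ts w' x)) c ?_ ?_]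
  · have hc := h c
    simp at hc
    have hiff : (c ∈ PySem.Set.ofList ts ∧ decide (pvSat ts w c) = false ∧ decide (pvSat ts w' c) = true)
        ↔ (c ∈ ts ∧ w.count c + 1 = ts.count c) := by
      simp only [PySem.Set.mem_ofList, decide_eq_false_iff_not, decide_eq_true_eq, pvSat, hc]
      constructor
      · rintro ⟨hm, h2', h3'⟩
        exact ⟨hm, by omega⟩
      · rintro ⟨hm, he⟩
        exact ⟨hm, by omega, by omega⟩
    rw [if_congr hiff rfl rfl]
  · intro x _ hxc
    have hx := h x
    rw [if_neg (fun e => hxc e.symm)] at hx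
    simp only [pvSat]
    simp [Nat.add_zero] at hx
    simp [hx]
  · intro hsat
    simp only [pvSat, decide_eq_true_eq] at hsat ⊢
    have hc := h c
    simp at hc
    omega

lemma pvFormed_nil (ts : List Char) : pvFormedN ts [] = 0 := by
  unfold pvFormedN
  rw [List.length_eq_zero_iff]
  rw [List.filter_eq_nil_iff]
  intro c hc
  have hm : c ∈ ts := (PySem.Set.mem_ofList ts c).mp hc
  have hpos : 0 < ts.count c := List.count_pos_iff.mpr hm
  simp [pvSat]
  omega

lemma pvCov_iff_formed (ts w : List Char) :
    pvCov ts w ↔ pvFormedN ts w = (PySem.Set.ofList ts).length := by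
  unfold pvCov pvFormedN
  constructor
  · intro h
    have : (PySem.Set.ofList ts).filter (fun c => decide (pvSat ts w c)) = PySem.Set.ofList ts := by
      apply List.filter_eq_self.mpr
      intro a ha
      simpa using h a ha
    rw [this]
  · intro h c hc
    have hsub := List.filter_sublist (l := PySem.Set.ofList ts) (p := fun c => decide (pvSat ts w c))
    have heq := hsub.eq_of_length h
    rw [← heq] at hc
    simpa using List.of_mem_filter hc

lemma pvUpd_pvUpd (a : Option (Nat × Nat × Nat)) (c1 c2 : Nat × Nat × Nat) (h : c2.1 < c1.1) :
    pvUpd (pvUpd a c1) c2 = pvUpd a c2 := by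
  rcases a with _ | ⟨L, x, y⟩ <;>
    simp only [pvUpd] <;> split_ifs <;> simp_all <;> omega

lemma pvUpd_fst_le (a : Option (Nat × Nat × Nat)) (c : Nat × Nat × Nat) :
    ∃ L x y, pvUpd a c = some (L, x, y) ∧ L ≤ c.1 ∧ (∀ L' x' y', a = some (L', x', y') → L ≤ L') := by
  obtain ⟨cl, cx, cy⟩ := c
  rcases a with _ | ⟨L, x, y⟩
  · exact ⟨cl, cx, cy, rfl, le_refl _, by simp⟩
  · by_cases h : cl < L
    · exact ⟨cl, cx, cy, by simp [pvUpd, h], le_refl _, by intro L' x' y' he; cases he; omega⟩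
    · exact ⟨L, x, y, by simp [pvUpd, h], by omega, by intro L' x' y' he; cases he; omega⟩

lemma pvRequiredEq (ts : List Char) :
    ((PySem.Dict.counter ts).size : Int) = ((PySem.Set.ofList ts).length : Int) := by
  have : (PySem.Dict.counter ts).size = (PySem.Set.ofList ts).length := by
    unfold PySem.Dict.size
    rw [PySem.Dict.items_counter, List.length_map]
  rw [this]

lemma pvCondIff (ts w : List Char) (cnt : PySem.Dict Char Int) (c : Char) (wok : pvWOK cnt w) :
    ((PySem.Dict.counter ts).contains c = true ∧
      (cnt.insert c (cnt.getD c 0 + 1)).getD c 0 = (PySem.Dict.counter ts).getD c 0) ↔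
    (c ∈ ts ∧ w.count c + 1 = ts.count c) := by
  rw [PySem.Dict.contains_counter, PySem.Dict.getD_insert_self, wok c, PySem.Dict.getD_counter]
  constructor
  · rintro ⟨h1, h2⟩
    refine ⟨by simpa using h1, by exact_mod_cast h2⟩
  · rintro ⟨h1, h2⟩
    refine ⟨by simpa using h1, by exact_mod_cast h2⟩

lemma pvCount_bump_cons (w : List Char) (c x : Char) :
    (c :: w).count x = w.count x + (if c = x then 1 else 0) := by
  rw [List.count_cons]
  simp

lemma pvCount_bump_append (w : List Char) (c x : Char) :
    (w ++ [c]).count x = w.count x + (if c = x then 1 else 0) := by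
  rw [List.count_append, List.count_singleton]
  congr 1
  simp only [beq_iff_eq]

lemma pvWOK_bump (cnt : PySem.Dict Char Int) (w w' : List Char) (c : Char) (wok : pvWOK cnt w)
    (h : ∀ x, w'.count x = w.count x + (if c = x then 1 else 0)) :
    pvWOK (cnt.insert c (cnt.getD c 0 + 1)) w' := by
  intro x
  rw [PySem.Dict.getD_insert]
  by_cases e : x = c
  · subst e
    rw [if_pos rfl, wok x, h x, if_pos rfl]
    push_cast
    ring
  · rw [if_neg e, wok x, h x, if_neg (fun e' => e e'.symm)]
    simp

lemma pvWOK_drop (wc : PySem.Dict Char Int) (w : List Char) (c : Char)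
    (wok : pvWOK wc (c :: w)) :
    pvWOK (wc.insert c (wc.getD c 0 - 1)) w := by
  intro x
  rw [PySem.Dict.getD_insert]
  by_cases e : x = c
  · subst e
    rw [if_pos rfl, wok x, pvCount_bump_cons w x x, if_pos rfl]
    push_cast
    ring
  · rw [if_neg e, wok x, pvCount_bump_cons w c x, if_neg (fun e' => e e'.symm)]
    simp

lemma pvFormed_drop (ts w : List Char) (c : Char) (wc : PySem.Dict Char Int)
    (wok : pvWOK wc (c :: w)) (hc : pvCov ts (c :: w)) :
    (if (PySem.Dict.counter ts).contains c = true ∧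
        (wc.insert c (wc.getD c 0 - 1)).getD c 0 < (PySem.Dict.counter ts).getD c 0
      then ((pvFormedN ts (c :: w) : Int)) - 1 else ((pvFormedN ts (c :: w) : Int)))
    = (pvFormedN ts w : Int) := by
  have hadd := pvFormed_add ts w (c :: w) c (pvCount_bump_cons w c)
  have hgd : (wc.insert c (wc.getD c 0 - 1)).getD c 0 = (w.count c : Int) := by
    rw [PySem.Dict.getD_insert_self, wok c, pvCount_bump_cons w c c, if_pos rfl]
    push_cast
    ring
  rw [hgd, PySem.Dict.contains_counter, PySem.Dict.getD_counter]
  by_cases hm : c ∈ ts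
  · have hsat := hc c ((PySem.Set.mem_ofList ts c).mpr hm)
    unfold pvSat at hsat
    rw [pvCount_bump_cons w c c, if_pos rfl] at hsat
    by_cases heq : w.count c + 1 = ts.count c
    · rw [if_pos ⟨by simpa using hm, by exact_mod_cast (by omega : w.count c < ts.count c)⟩]
      rw [hadd, if_pos ⟨hm, heq⟩]
      push_cast
      ring
    · rw [if_neg (fun ⟨_, hlt⟩ => heq (by
        have : w.count c < ts.count c := by exact_mod_cast hlt
        omega))]
      rw [hadd, if_neg (fun ⟨_, he⟩ => heq he)]
      simp
  · rw [if_neg (fun ⟨hin, _⟩ => hm (by simpa using hin))]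
    rw [hadd, if_neg (fun ⟨hin, _⟩ => hm hin)]
    simp

lemma pvCovIffFormed (ts w : List Char) :
    ((pvFormedN ts w : Int) = ((PySem.Dict.counter ts).size : Int)) ↔ pvCov ts w := by
  rw [pvRequiredEq]
  constructor
  · intro h
    exact (pvCov_iff_formed ts w).mpr (by exact_mod_cast h)
  · intro h
    exact_mod_cast (pvCov_iff_formed ts w).mp h

lemma pvHv_bump (ts w w' : List Char) (cnt : PySem.Dict Char Int) (c : Char) (wok : pvWOK cnt w)
    (h : ∀ x, w'.count x = w.count x + (if c = x then 1 else 0)) :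
    (if (PySem.Dict.counter ts).contains c = true ∧
        (cnt.insert c (cnt.getD c 0 + 1)).getD c 0 = (PySem.Dict.counter ts).getD c 0
      then ((pvFormedN ts w : Int)) + 1 else ((pvFormedN ts w : Int)))
    = (pvFormedN ts w' : Int) := by
  rw [if_congr (pvCondIff ts w cnt c wok) rfl rfl]
  rw [pvFormed_add ts w w' c h]
  split_ifs with hh
  · push_cast; ring
  · push_cast; ring

-- One unfolded step of B's descending scan.
lemma pvScan_step (cs ts : List Char) (r l : Nat) (cnt : PySem.Dict Char Int)
    (hl : l ≤ r) (wok : pvWOK cnt (pvWin cs (l + 1) (r + 1))) :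
    pvScanB cs (PySem.Dict.counter ts) ((PySem.Dict.counter ts).size : Int) l cnt
      ((pvFormedN ts (pvWin cs (l + 1) (r + 1)) : Int))
    = (if pvCov ts (pvWin cs l (r + 1)) then some l
       else match l with
        | 0 => none
        | l' + 1 => pvScanB cs (PySem.Dict.counter ts) ((PySem.Dict.counter ts).size : Int) l'
            (cnt.insert (cs.getD (l % cs.length) ' ') (cnt.getD (cs.getD (l % cs.length) ' ') 0 + 1))
            ((pvFormedN ts (pvWin cs l (r + 1)) : Int))) := by
  have hbump : ∀ x, (pvWin cs l (r + 1)).count x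
      = (pvWin cs (l + 1) (r + 1)).count x + (if cs.getD (l % cs.length) ' ' = x then 1 else 0) := by
    intro x
    rw [pvWin_cons cs l (r + 1) (by omega)]
    exact pvCount_bump_cons _ _ _
  have hhv := pvHv_bump ts (pvWin cs (l + 1) (r + 1)) (pvWin cs l (r + 1)) cnt
    (cs.getD (l % cs.length) ' ') wok hbump
  rw [pvScanB.eq_def]
  simp only []
  rw [hhv, if_congr (pvCovIffFormed ts (pvWin cs l (r + 1))) rfl rfl]

-- One unfolded step of A's while loop.
lemma pvShrink_step (cs ts : List Char) (hts : ts ≠ []) (right left : Nat)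
    (wc : PySem.Dict Char Int) (ans : Option (Nat × Nat × Nat))
    (hl : left ≤ right + 1) (wok : pvWOK wc (pvWin cs left (right + 1))) :
    pvShrinkA cs (PySem.Dict.counter ts) ((PySem.Dict.counter ts).size : Int) right left
      ((pvFormedN ts (pvWin cs left (right + 1)) : Int)) wc ans
    = (if pvCov ts (pvWin cs left (right + 1)) then
        pvShrinkA cs (PySem.Dict.counter ts) ((PySem.Dict.counter ts).size : Int) right (left + 1)
          ((pvFormedN ts (pvWin cs (left + 1) (right + 1)) : Int))
          (wc.insert (cs.getD (left % cs.length) ' ') (wc.getD (cs.getD (left % cs.length) ' ') 0 - 1))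
          (pvUpd ans (right - left + 1, left, right))
      else (left, ((pvFormedN ts (pvWin cs left (right + 1)) : Int)), wc, ans)) := by
  by_cases hcov : pvCov ts (pvWin cs left (right + 1))
  · have hlr : left ≤ right := by
      rcases Nat.lt_or_ge left (right + 1) with h | h
      · rcases Nat.lt_or_ge left right with h2 | h2
        · omega
        · have : left = right ∨ left = right + 1 := by omega
          rcases this with h3 | h3
          · omega
          · exfalso
            rw [h3, pvWin_nil] at hcov
            exact pvCov_nil ts hts hcov
      · exfalso
        have h3 : left = right + 1 := by omega
        rw [h3, pvWin_nil] at hcov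
        exact pvCov_nil ts hts hcov
    have hwin : pvWin cs left (right + 1)
        = (cs.getD (left % cs.length) ' ') :: pvWin cs (left + 1) (right + 1) :=
      pvWin_cons cs left (right + 1) (by omega)
    have hwok2 : pvWOK wc ((cs.getD (left % cs.length) ' ') :: pvWin cs (left + 1) (right + 1)) := by
      rw [← hwin]; exact wok
    have hcov2 : pvCov ts ((cs.getD (left % cs.length) ' ') :: pvWin cs (left + 1) (right + 1)) := by
      rw [← hwin]; exact hcov
    have hdrop := pvFormed_drop ts (pvWin cs (left + 1) (right + 1))
      (cs.getD (left % cs.length) ' ') wc hwok2 hcov2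
    rw [pvShrinkA.eq_def]
    rw [dif_pos ⟨hlr, ((pvCovIffFormed ts (pvWin cs left (right + 1))).mpr hcov)⟩]
    rw [if_pos hcov]
    simp only []
    rw [← hwin] at hdrop
    rw [hdrop]
    rcases ans with _ | ⟨L, a, b⟩
    · rfl
    · rfl
  · rw [pvShrinkA.eq_def]
    rw [dif_neg, if_neg hcov]
    rintro ⟨h1, h2⟩
    exact hcov ((pvCovIffFormed ts (pvWin cs left (right + 1))).mp h2)

-- Characterisation of A's inner while loop.
lemma pvShrink_spec (cs ts : List Char) (hcs : cs ≠ []) (hts : ts ≠ []) (right : Nat) :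
    ∀ (k left : Nat) (wc : PySem.Dict Char Int) (ans : Option (Nat × Nat × Nat)),
    right + 1 - left ≤ k → left ≤ right + 1 →
    pvWOK wc (pvWin cs left (right + 1)) →
    (let res := pvShrinkA cs (PySem.Dict.counter ts) ((PySem.Dict.counter ts).size : Int) right left
        ((pvFormedN ts (pvWin cs left (right + 1)) : Int)) wc ans
     left ≤ res.1 ∧ res.1 ≤ right + 1 ∧
     pvWOK res.2.2.1 (pvWin cs res.1 (right + 1)) ∧
     res.2.1 = ((pvFormedN ts (pvWin cs res.1 (right + 1)) : Int)) ∧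
     ¬ pvCov ts (pvWin cs res.1 (right + 1)) ∧
     ((res.1 = left ∧ res.2.2.2 = ans) ∨
      (left < res.1 ∧ pvCov ts (pvWin cs (res.1 - 1) (right + 1)) ∧
       res.2.2.2 = pvUpd ans (right - (res.1 - 1) + 1, res.1 - 1, right)))) := by
  intro k
  induction k with
  | zero =>
    intro left wc ans hk hl wok
    have hle : left = right + 1 := by omega
    subst hle
    simp only []
    rw [pvShrink_step cs ts hts right (right + 1) wc ans (le_refl _) wok]
    rw [if_neg (by rw [pvWin_nil]; exact pvCov_nil ts hts)]
    refine ⟨le_refl _, le_refl _, wok, rfl, ?_, Or.inl ⟨rfl, rfl⟩⟩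
    rw [pvWin_nil]
    exact pvCov_nil ts hts
  | succ k ih =>
    intro left wc ans hk hl wok
    simp only []
    by_cases hcov : pvCov ts (pvWin cs left (right + 1))
    · have hlr : left ≤ right := by
        by_contra hc
        have he : left = right + 1 := by omega
        rw [he, pvWin_nil] at hcov
        exact pvCov_nil ts hts hcov
      have hwin : pvWin cs left (right + 1)
          = (cs.getD (left % cs.length) ' ') :: pvWin cs (left + 1) (right + 1) :=
        pvWin_cons cs left (right + 1) (by omega)
      have wok' : pvWOK
          (wc.insert (cs.getD (left % cs.length) ' ') (wc.getD (cs.getD (left % cs.length) ' ') 0 - 1))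
          (pvWin cs (left + 1) (right + 1)) :=
        pvWOK_drop wc _ _ (hwin ▸ wok)
      have hrec := ih (left + 1)
        (wc.insert (cs.getD (left % cs.length) ' ') (wc.getD (cs.getD (left % cs.length) ' ') 0 - 1))
        (pvUpd ans (right - left + 1, left, right)) (by omega) (by omega) wok'
      simp only [] at hrec
      rw [pvShrink_step cs ts hts right left wc ans hl wok, if_pos hcov]
      obtain ⟨ih1, ih2, ih3, ih4, ih5, ih6⟩ := hrec
      refine ⟨by omega, ih2, ih3, ih4, ih5, ?_⟩
      rcases ih6 with ⟨he, hans⟩ | ⟨hlt, hc2, hans⟩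
      · right
        refine ⟨by omega, ?_, ?_⟩
        · rw [he]
          simpa using hcov
        · rw [hans, he]
          simp
      · right
        refine ⟨by omega, hc2, ?_⟩
        rw [hans, pvUpd_pvUpd _ _ _ (by simp only []; omega)]
    · rw [pvShrink_step cs ts hts right left wc ans hl wok, if_neg hcov]
      exact ⟨le_refl _, hl, wok, rfl, hcov, Or.inl ⟨rfl, rfl⟩⟩

-- Characterisation of B's inner descending scan.
lemma pvScan_spec (cs ts : List Char) (hcs : cs ≠ []) (hts : ts ≠ []) (r : Nat) :
    ∀ (l : Nat) (cnt : PySem.Dict Char Int), l ≤ r →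
    pvWOK cnt (pvWin cs (l + 1) (r + 1)) →
    (∀ m : Nat, l < m → m ≤ r → ¬ pvCov ts (pvWin cs m (r + 1))) →
    (let res := pvScanB cs (PySem.Dict.counter ts) ((PySem.Dict.counter ts).size : Int) l cnt
        ((pvFormedN ts (pvWin cs (l + 1) (r + 1)) : Int))
     (∀ m, res = some m → m ≤ l ∧ pvCov ts (pvWin cs m (r + 1)) ∧
        ∀ m', m < m' → m' ≤ r → ¬ pvCov ts (pvWin cs m' (r + 1))) ∧
     (res = none → ∀ m, m ≤ r → ¬ pvCov ts (pvWin cs m (r + 1)))) := by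
  intro l
  induction l with
  | zero =>
    intro cnt hl wok hmax
    simp only []
    rw [pvScan_step cs ts r 0 cnt hl wok]
    by_cases hcov : pvCov ts (pvWin cs 0 (r + 1))
    · rw [if_pos hcov]
      constructor
      · intro m hm
        cases hm
        refine ⟨le_refl _, hcov, ?_⟩
        intro m' hm1 hm2
        exact hmax m' hm1 hm2
      · intro h
        cases h
    · rw [if_neg hcov]
      constructor
      · intro m hm
        cases hm
      · intro _ m hm
        rcases Nat.eq_zero_or_pos m with he | hp
        · subst he
          exact hcov
        · exact hmax m hp hm
  | succ l' ih =>
    intro cnt hl wok hmax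
    simp only []
    rw [pvScan_step cs ts r (l' + 1) cnt hl wok]
    by_cases hcov : pvCov ts (pvWin cs (l' + 1) (r + 1))
    · rw [if_pos hcov]
      constructor
      · intro m hm
        cases hm
        exact ⟨le_refl _, hcov, fun m' hm1 hm2 => hmax m' hm1 hm2⟩
      · intro h
        cases h
    · rw [if_neg hcov]
      have hwin : pvWin cs (l' + 1) (r + 1)
          = (cs.getD ((l' + 1) % cs.length) ' ') :: pvWin cs (l' + 1 + 1) (r + 1) :=
        pvWin_cons cs (l' + 1) (r + 1) (by omega)
      have wok' : pvWOK
          (cnt.insert (cs.getD ((l' + 1) % cs.length) ' ')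
            (cnt.getD (cs.getD ((l' + 1) % cs.length) ' ') 0 + 1))
          (pvWin cs (l' + 1) (r + 1)) := by
        apply pvWOK_bump cnt (pvWin cs (l' + 1 + 1) (r + 1)) _ _ wok
        intro x
        rw [hwin]
        exact pvCount_bump_cons _ _ _
      have hmax' : ∀ m : Nat, l' < m → m ≤ r → ¬ pvCov ts (pvWin cs m (r + 1)) := by
        intro m hm1 hm2
        rcases Nat.lt_or_ge l' (m - 1) with h | h
        · exact hmax m (by omega) hm2
        · have : m = l' + 1 := by omega
          subst this
          exact hcov
      have := ih
        (cnt.insert (cs.getD ((l' + 1) % cs.length) ' ')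
          (cnt.getD (cs.getD ((l' + 1) % cs.length) ' ') 0 + 1))
        (by omega) wok' hmax'
      simp only [] at this
      obtain ⟨hsome, hnone⟩ := this
      constructor
      · intro m hm
        obtain ⟨h1, h2, h3⟩ := hsome m hm
        exact ⟨by omega, h2, h3⟩
      · exact hnone

-- One step of the main `for right in range(2n)` loop preserves the joint invariant.
lemma pvStep_inv (cs ts : List Char) (hcs : cs ≠ []) (hts : ts ≠ []) (N : Nat)
    (stA : Nat × Int × PySem.Dict Char Int × Option (Nat × Nat × Nat))
    (h1 : stA.1 ≤ N)
    (h2 : pvWOK stA.2.2.1 (pvWin cs stA.1 N))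
    (h3 : stA.2.1 = ((pvFormedN ts (pvWin cs stA.1 N) : Int)))
    (h4 : ¬ pvCov ts (pvWin cs stA.1 N))
    (h6 : ∀ l, l < stA.1 → ∃ L a b, stA.2.2.2 = some (L, a, b) ∧ L + l ≤ N) :
    (let stA' := pvShrinkA cs (PySem.Dict.counter ts) ((PySem.Dict.counter ts).size : Int) N stA.1
        (if (PySem.Dict.counter ts).contains (cs.getD (N % cs.length) ' ') = true ∧
            (stA.2.2.1.insert (cs.getD (N % cs.length) ' ')
              (stA.2.2.1.getD (cs.getD (N % cs.length) ' ') 0 + 1)).getD (cs.getD (N % cs.length) ' ') 0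
            = (PySem.Dict.counter ts).getD (cs.getD (N % cs.length) ' ') 0
          then stA.2.1 + 1 else stA.2.1)
        (stA.2.2.1.insert (cs.getD (N % cs.length) ' ')
          (stA.2.2.1.getD (cs.getD (N % cs.length) ' ') 0 + 1))
        stA.2.2.2
     let stB' := match pvScanB cs (PySem.Dict.counter ts) ((PySem.Dict.counter ts).size : Int) N
        PySem.Dict.empty 0 with
      | none => stA.2.2.2
      | some l => match stA.2.2.2 with
        | none => some (N - l + 1, l, N)
        | some (L, a, b) => if N - l + 1 < L then some (N - l + 1, l, N) else some (L, a, b)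
     stA'.1 ≤ N + 1 ∧
     pvWOK stA'.2.2.1 (pvWin cs stA'.1 (N + 1)) ∧
     stA'.2.1 = ((pvFormedN ts (pvWin cs stA'.1 (N + 1)) : Int)) ∧
     ¬ pvCov ts (pvWin cs stA'.1 (N + 1)) ∧
     stA'.2.2.2 = stB' ∧
     (∀ l, l < stA'.1 → ∃ L a b, stA'.2.2.2 = some (L, a, b) ∧ L + l ≤ N + 1)) := by
  simp only []
  have hwin : pvWin cs stA.1 (N + 1) = pvWin cs stA.1 N ++ [cs.getD (N % cs.length) ' '] :=
    pvWin_succ cs stA.1 N h1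
  have hbump : ∀ x, (pvWin cs stA.1 (N + 1)).count x
      = (pvWin cs stA.1 N).count x + (if cs.getD (N % cs.length) ' ' = x then 1 else 0) := by
    intro x
    rw [hwin]
    exact pvCount_bump_append _ _ _
  have hform : (if (PySem.Dict.counter ts).contains (cs.getD (N % cs.length) ' ') = true ∧
      (stA.2.2.1.insert (cs.getD (N % cs.length) ' ')
        (stA.2.2.1.getD (cs.getD (N % cs.length) ' ') 0 + 1)).getD (cs.getD (N % cs.length) ' ') 0
      = (PySem.Dict.counter ts).getD (cs.getD (N % cs.length) ' ') 0
      then stA.2.1 + 1 else stA.2.1) = ((pvFormedN ts (pvWin cs stA.1 (N + 1)) : Int)) := by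
    rw [h3]
    exact pvHv_bump ts (pvWin cs stA.1 N) (pvWin cs stA.1 (N + 1)) stA.2.2.1 _ h2 hbump
  rw [hform]
  have hwok1 : pvWOK (stA.2.2.1.insert (cs.getD (N % cs.length) ' ')
      (stA.2.2.1.getD (cs.getD (N % cs.length) ' ') 0 + 1)) (pvWin cs stA.1 (N + 1)) :=
    pvWOK_bump _ _ _ _ h2 hbump
  have hshr := pvShrink_spec cs ts hcs hts N (N + 1 - stA.1) stA.1
    (stA.2.2.1.insert (cs.getD (N % cs.length) ' ')
      (stA.2.2.1.getD (cs.getD (N % cs.length) ' ') 0 + 1)) stA.2.2.2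
    (le_refl _) (by omega) hwok1
  simp only [] at hshr
  obtain ⟨s1, s2, s3, s4, s5, s6⟩ := hshr
  have h0 : ((pvFormedN ts (pvWin cs (N + 1) (N + 1)) : Int)) = 0 := by
    rw [pvWin_nil, pvFormed_nil]
    rfl
  have hscan := pvScan_spec cs ts hcs hts N N PySem.Dict.empty (le_refl N)
    (by intro x; rw [pvWin_nil]; simp [PySem.Dict.getD_empty])
    (by intro m hm1 hm2; omega)
  rw [h0] at hscan
  simp only [] at hscan
  obtain ⟨hsome, hnone⟩ := hscan
  rcases hres : pvScanB cs (PySem.Dict.counter ts) ((PySem.Dict.counter ts).size : Int) N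
      PySem.Dict.empty 0 with _ | m
  · -- no covering window ends at N: A's while loop cannot have moved, B keeps its best
    have hnone' := hnone hres
    rcases s6 with ⟨he, hans⟩ | ⟨hlt, hc2, hans⟩
    · refine ⟨by omega, s3, s4, s5, ?_, ?_⟩
      · exact hans
      · intro l hl
        rw [he] at hl
        obtain ⟨L, a, b, hab, hLb⟩ := h6 l hl
        exact ⟨L, a, b, hans.trans hab, by omega⟩
    · exact absurd hc2 (hnone' _ (by omega))
  · obtain ⟨hm1, hm2, hm3⟩ := hsome m hres
    by_cases hcase : stA.1 ≤ m
    · -- the tightest covering window at N starts at or after A's left pointer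
      have hcovleft : pvCov ts (pvWin cs stA.1 (N + 1)) := by
        have he : stA.1 + (m - stA.1) = m := by omega
        exact pvCov_anti cs ts hts (N + 1) (m - stA.1) stA.1 (by rw [he]; exact hm2)
      rcases s6 with ⟨he, hans⟩ | ⟨hlt, hc2, hans⟩
      · exact absurd hcovleft (he ▸ s5)
      · have hres1 : (pvShrinkA cs (PySem.Dict.counter ts) ((PySem.Dict.counter ts).size : Int) N stA.1
            ((pvFormedN ts (pvWin cs stA.1 (N + 1)) : Int))
            (stA.2.2.1.insert (cs.getD (N % cs.length) ' ')
              (stA.2.2.1.getD (cs.getD (N % cs.length) ' ') 0 + 1)) stA.2.2.2).1 - 1 = m := by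
          by_contra hne
          rcases Nat.lt_or_ge ((pvShrinkA cs (PySem.Dict.counter ts) ((PySem.Dict.counter ts).size : Int) N stA.1
              ((pvFormedN ts (pvWin cs stA.1 (N + 1)) : Int))
              (stA.2.2.1.insert (cs.getD (N % cs.length) ' ')
                (stA.2.2.1.getD (cs.getD (N % cs.length) ' ') 0 + 1)) stA.2.2.2).1 - 1) m with hh | hh
          · have he2 : (pvShrinkA cs (PySem.Dict.counter ts) ((PySem.Dict.counter ts).size : Int) N stA.1
                ((pvFormedN ts (pvWin cs stA.1 (N + 1)) : Int))
                (stA.2.2.1.insert (cs.getD (N % cs.length) ' ')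
                  (stA.2.2.1.getD (cs.getD (N % cs.length) ' ') 0 + 1)) stA.2.2.2).1
                + (m - (pvShrinkA cs (PySem.Dict.counter ts) ((PySem.Dict.counter ts).size : Int) N stA.1
                ((pvFormedN ts (pvWin cs stA.1 (N + 1)) : Int))
                (stA.2.2.1.insert (cs.getD (N % cs.length) ' ')
                  (stA.2.2.1.getD (cs.getD (N % cs.length) ' ') 0 + 1)) stA.2.2.2).1) = m := by omega
            exact s5 (pvCov_anti cs ts hts (N + 1) _ _ (by rw [he2]; exact hm2))
          · exact hm3 _ (by omega) (by omega) hc2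
        rw [hres1] at hans
        refine ⟨by omega, s3, s4, s5, ?_, ?_⟩
        · exact hans
        · intro l hl
          obtain ⟨L, x, y, hupd, hLle, _⟩ := pvUpd_fst_le stA.2.2.2 (N - m + 1, m, N)
          refine ⟨L, x, y, hans.trans hupd, ?_⟩
          simp only [] at hLle
          omega
    · -- the covering window starts strictly before A's left pointer: no update on either side
      obtain ⟨L, a, b, hansA, hLb⟩ := h6 m (by omega)
      have hnc : ¬ pvCov ts (pvWin cs stA.1 (N + 1)) := hm3 stA.1 (by omega) h1
      rcases s6 with ⟨he, hans⟩ | ⟨hlt, hc2, hans⟩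
      · refine ⟨by omega, s3, s4, s5, ?_, ?_⟩
        · refine hans.trans ?_
          rw [hansA]
          simp only []
          rw [if_neg (by omega)]
        · intro l hl
          rw [he] at hl
          obtain ⟨L2, a2, b2, hab2, hLb2⟩ := h6 l hl
          exact ⟨L2, a2, b2, hans.trans hab2, by omega⟩
      · exact absurd hc2 (hm3 _ (by omega) (by omega))

-- The main loop invariant: A's fold state and B's fold state over range N.
lemma pvFold_inv (cs ts : List Char) (hcs : cs ≠ []) (hts : ts ≠ []) (N : Nat) :
    (let tc := PySem.Dict.counter ts
     let required : Int := tc.size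
     let stA := (List.range N).foldl
      (fun st right =>
        let c := cs.getD (right % cs.length) ' '
        let wc := st.2.2.1.insert c (st.2.2.1.getD c 0 + 1)
        let formed := if tc.contains c = true ∧ wc.getD c 0 = tc.getD c 0 then st.2.1 + 1 else st.2.1
        pvShrinkA cs tc required right st.1 formed wc st.2.2.2)
      ((0 : Nat), (0 : Int), PySem.Dict.empty, (none : Option (Nat × Nat × Nat)))
     let stB := (List.range N).foldl
      (fun best r =>
        match pvScanB cs tc required r PySem.Dict.empty 0 with
        | none => best
        | some l =>
          match best with
          | none => some (r - l + 1, l, r)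
          | some (L, a, b) => if r - l + 1 < L then some (r - l + 1, l, r) else some (L, a, b))
      (none : Option (Nat × Nat × Nat))
     stA.1 ≤ N ∧
     pvWOK stA.2.2.1 (pvWin cs stA.1 N) ∧
     stA.2.1 = ((pvFormedN ts (pvWin cs stA.1 N) : Int)) ∧
     ¬ pvCov ts (pvWin cs stA.1 N) ∧
     stA.2.2.2 = stB ∧
     (∀ l, l < stA.1 → ∃ L a b, stA.2.2.2 = some (L, a, b) ∧ L + l ≤ N)) := by
  induction N with
  | zero =>
    simp only [List.range_zero, List.foldl_nil]
    refine ⟨by omega, ?_, ?_, ?_, by trivial, by intro l hl; omega⟩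
    · intro c
      rw [pvWin_nil]
      simp [PySem.Dict.getD_empty]
    · rw [pvWin_nil, pvFormed_nil]
      rfl
    · rw [pvWin_nil]
      exact pvCov_nil ts hts
  | succ N ihN =>
    simp only [] at ihN ⊢
    rw [List.range_succ, List.foldl_append, List.foldl_append]
    simp only [List.foldl_cons, List.foldl_nil]
    obtain ⟨ih1, ih2, ih3, ih4, ih5, ih6⟩ := ihN
    rw [← ih5]
    exact pvStep_inv cs ts hcs hts N _ ih1 ih2 ih3 ih4 ih6

-- ===== VERDICT (by name: the statement is the Claim_ definition above) =====
theorem min_window_substring_with_circular_spec : Claim_equal_min_window_substring_with_circular := by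
  intro s t _
  unfold Spec_min_window_substring_with_circular
  unfold min_window_substring_with_circular min_window_substring_with_circular_alt
  simp only []
  by_cases h : s.toList = [] ∨ t.toList = []
  · rw [if_pos h, if_pos h]
  · rw [if_neg h, if_neg h]
    push_neg at h
    have hinv := pvFold_inv s.toList t.toList h.1 h.2 (2 * s.toList.length)
    simp only [] at hinv
    rw [hinv.2.2.2.2.1]
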